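-- pv_equiv track=rewrite | github.com/ehghks021203/CodingTest | Baekjoon/Class1/B2_8958.py | solution
-- ===== SOURCE A (Python) =====
-- def solution(result: str) -> int:
-- 	score = 0
-- 	combo = 0
-- 	for r in result:
-- 		if r == "O":
-- 			score += 1 + combo
-- 			combo += 1
-- 		else:
-- 			combo = 0
-- 	return score
-- ===== SOURCE B (Python) =====
-- def solution(result: str) -> int:
--     total = 0
--     i = 0
--     n = len(result)
--     while i < n:
--         if result[i] == "O":
--             j = i
--             while j < n and result[j] == "O":
--                 j += 1
--             L = j - i
--             total += L * (L + 1) // 2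
--             i = j
--         else:
--             i += 1
--     return total
-- ===== Notes on version B (the rewrite author's own statement) =====
-- stated objective: alternative
-- what changed: Replaces the per-character score/combo accumulator with a scan over maximal runs of 'O', adding each run's closed-form triangular contribution L*(L+1)//2.
import Mathlib
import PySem

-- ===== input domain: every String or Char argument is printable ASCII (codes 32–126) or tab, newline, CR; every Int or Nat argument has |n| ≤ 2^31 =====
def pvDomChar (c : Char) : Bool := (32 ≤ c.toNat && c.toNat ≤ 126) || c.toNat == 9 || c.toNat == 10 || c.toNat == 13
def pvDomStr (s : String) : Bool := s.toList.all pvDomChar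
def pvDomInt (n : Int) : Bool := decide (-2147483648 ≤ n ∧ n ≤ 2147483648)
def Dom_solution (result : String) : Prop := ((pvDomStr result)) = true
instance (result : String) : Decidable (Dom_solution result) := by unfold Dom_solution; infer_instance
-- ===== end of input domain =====

-- B replaces A's per-character score/combo accumulator with a scan over maximal runs
-- of 'O', adding each run's closed-form triangular contribution L*(L+1)/2 (alternative).

-- ===== PORT A =====
-- for r in result: if r == "O": score += 1 + combo; combo += 1 else: combo = 0
def solution (result : String) : Int :=
  (result.toList.foldl
    (fun (st : Int × Int) r =>
      if r = 'O' then (st.1 + 1 + st.2, st.2 + 1) else (st.1, 0))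
    (0, 0)).1

-- ===== PORT B =====
-- Source B's outer while: skip a non-'O' char, or consume a whole maximal run of 'O's
-- (the inner while = counting the run) and add L*(L+1)//2.
def solutionAltGo : List Char → Int
  | [] => 0
  | c :: cs =>
    if c = 'O' then
      let L : Nat := (cs.takeWhile (· = 'O')).length + 1
      (↑(L * (L + 1) / 2) : Int) + solutionAltGo (cs.dropWhile (· = 'O'))
    else
      solutionAltGo cs
termination_by l => l.length
decreasing_by
  · simpa using Nat.lt_succ_of_le (List.length_dropWhile_le (p := (· = 'O')) (l := cs))
  · simp

def solution_alt (result : String) : Int := solutionAltGo result.toList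

-- ===== PRECONDITION & SPEC =====
def Spec_solution (result : String) (out : Int) : Prop := out = solution_alt result
instance (result : String) (out : Int) : Decidable (Spec_solution result out) := by unfold Spec_solution; infer_instance

-- ===== CLAIM (what is proved, stated in full; the proofs are below) =====
def Claim_equal_solution : Prop := ∀ (result : String), Dom_solution result → Spec_solution result (solution result)

-- ===== LEMMAS AND PROOFS =====

-- remaining score contributed by list l when the current combo is k
def hScore (k : Int) : List Char → Int
  | [] => 0
  | c :: cs => if c = 'O' then (1 + k) + hScore (k + 1) cs else hScore 0 cs

-- partial sum of a run: S k m = (1+k) + (2+k) + … + (m+k)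
def runSum (k : Int) : Nat → Int
  | 0 => 0
  | m + 1 => (1 + k) + runSum (k + 1) m

lemma two_runSum (k : Int) (m : Nat) : 2 * runSum k m = 2 * k * m + m * (m + 1) := by
  induction m generalizing k with
  | zero => simp [runSum]
  | succ m ih =>
    simp only [runSum, mul_add, ih (k + 1)]
    push_cast
    ring

lemma foldl_eq_hScore (l : List Char) (s k : Int) :
    (l.foldl (fun (st : Int × Int) r =>
        if r = 'O' then (st.1 + 1 + st.2, st.2 + 1) else (st.1, 0)) (s, k)).1
      = s + hScore k l := by
  induction l generalizing s k with
  | nil => simp [hScore]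
  | cons c cs ih =>
    by_cases hc : c = 'O'
    · simp [hScore, hc, ih]; ring
    · simp [hScore, hc, ih]

lemma hScore_run (l : List Char) (k : Int) :
    hScore k l = runSum k (l.takeWhile (· = 'O')).length
      + hScore 0 (l.dropWhile (· = 'O')) := by
  induction l generalizing k with
  | nil => simp [hScore, runSum]
  | cons c cs ih =>
    by_cases hc : c = 'O'
    · simp only [hScore, hc, List.takeWhile, List.dropWhile]
      simp only [decide_true, List.length_cons, runSum, ih (k + 1)]
      simp
      ring
    · rw [List.takeWhile_cons_of_neg (by simp [hc]), List.dropWhile_cons_of_neg (by simp [hc])]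
      simp only [List.length_nil, runSum, zero_add]
      simp [hScore, hc]

lemma tri_cast (L : Nat) : (↑(L * (L + 1) / 2) : Int) = runSum 0 L := by
  have h2 : 2 * runSum 0 L = 2 * 0 * L + (L : Int) * (L + 1) := two_runSum 0 L
  have hT : L * (L + 1) / 2 * 2 = L * (L + 1) :=
    Nat.div_mul_cancel (Nat.even_mul_succ_self L).two_dvd
  have hC : (↑(L * (L + 1) / 2) : Int) * 2 = (L : Int) * (L + 1) := by
    exact_mod_cast congrArg (fun n : Nat => (n : Int)) hT
  linarith

lemma hScore_eq_go_aux : ∀ (n : Nat) (l : List Char), l.length ≤ n →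
    hScore 0 l = solutionAltGo l := by
  intro n
  induction n with
  | zero =>
    intro l hl
    have : l = [] := List.eq_nil_of_length_eq_zero (Nat.le_zero.mp hl)
    subst this; simp [hScore, solutionAltGo]
  | succ n ih =>
    intro l hl
    cases l with
    | nil => simp [hScore, solutionAltGo]
    | cons c cs =>
      by_cases hc : c = 'O'
      · subst hc
        have hlen : (cs.dropWhile (· = 'O')).length ≤ n := by
          have := List.length_dropWhile_le (p := (· = 'O')) (l := cs)
          simp at hl; omega
        have hrun := hScore_run ('O' :: cs) 0
        rw [List.takeWhile_cons_of_pos (by simp), List.dropWhile_cons_of_pos (by simp)] at hrun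
        rw [solutionAltGo, if_pos rfl]
        show hScore 0 ('O' :: cs)
            = (↑(((cs.takeWhile (· = 'O')).length + 1) * ((cs.takeWhile (· = 'O')).length + 1 + 1) / 2) : Int)
              + solutionAltGo (cs.dropWhile (· = 'O'))
        rw [hrun, tri_cast, ih _ hlen, List.length_cons]
      · rw [solutionAltGo, if_neg hc]
        have : hScore 0 (c :: cs) = hScore 0 cs := by simp [hScore, hc]
        rw [this, ih cs (by simp at hl; omega)]

lemma hScore_eq_go (l : List Char) : hScore 0 l = solutionAltGo l :=
  hScore_eq_go_aux l.length l le_rfl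

-- ===== VERDICT (by name: the statement is the Claim_ definition above) =====
theorem solution_spec : Claim_equal_solution := by
  intro result _
  unfold Spec_solution solution solution_alt
  rw [foldl_eq_hScore, hScore_eq_go]
  simp
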